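-- pv_equiv track=rewrite | github.com/rdshr/shelf | scripts/generate_n2_shelf_dedup_viewer.py | valid_layer_pattern
-- ===== SOURCE A (Python) =====
-- CORNERS = ("FL", "FR", "BR", "BL")
--
-- SIDES = ("front", "right", "back", "left")
--
-- SIDE_CORNERS = {
--     "front": ("FL", "FR"),
--     "back": ("BL", "BR"),
--     "left": ("FL", "BL"),
--     "right": ("FR", "BR"),
-- }
--
-- def corners_from_side_panels(side_panels: tuple[str, ...]) -> set[str]:
--     covered: set[str] = set()
--     for side in side_panels:
--         c1, c2 = SIDE_CORNERS[side]
--         covered.add(c1)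
--         covered.add(c2)
--     return covered
--
-- def open_sides(side_panels: tuple[str, ...]) -> list[str]:
--     return [side for side in SIDES if side not in side_panels]
--
-- def valid_layer_pattern(rods: tuple[str, ...], side_panels: tuple[str, ...]) -> bool:
--     # Keep panel support complexity bounded: at most two side support panels per layer.
--     if len(side_panels) > 2:
--         return False
--
--     # For adjacent panels, shared corner support is counted once (no double counting).
--     panel_corner_count: dict[str, int] = {corner: 0 for corner in CORNERS}
--     for side in side_panels:
--         for corner in SIDE_CORNERS[side]:
--             panel_corner_count[corner] += 1
--     overlap_correction = sum(max(0, count - 1) for count in panel_corner_count.values())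
--
--     # R2: E(rod)=1, E(panel)=2, with overlap correction on shared panel corners.
--     equivalent_total = len(rods) + 2 * len(side_panels) - overlap_correction
--     if equivalent_total != 4:
--         return False
--
--     # R2 strong condition: full 4-corner support coverage is mandatory.
--     if (set(rods) | corners_from_side_panels(side_panels)) != set(CORNERS):
--         return False
--
--     # R7: at least one side open.
--     if len(open_sides(side_panels)) < 1:
--         return False
--
--     # Side support panel height <= h is enforced by generation model (one-layer panel).
--     return True
-- ===== SOURCE B (Python) =====
-- CORNERS = ("FL", "FR", "BR", "BL")
--
-- SIDES = ("front", "right", "back", "left")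
--
-- SIDE_CORNERS = {
--     "front": ("FL", "FR"),
--     "back": ("BL", "BR"),
--     "left": ("FL", "BL"),
--     "right": ("FR", "BR"),
-- }
--
-- def valid_layer_pattern(rods, side_panels):
--     # At most two side support panels per layer.
--     if len(side_panels) > 2:
--         return False
--     # Distinct corners covered by the panels.
--     covered = set()
--     for side in side_panels:
--         covered.update(SIDE_CORNERS[side])
--     # Equivalent support total: one per rod plus one per distinct panel corner
--     # (algebraically equal to A's 2*panels - overlap_correction).
--     if len(rods) + len(covered) != 4:
--         return False
--     # Full 4-corner coverage is mandatory; with <= 2 panels an open side always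
--     # remains, so no separate open-side check is needed.
--     return (set(rods) | covered) == set(CORNERS)
-- ===== Notes on version B (the rewrite author's own statement) =====
-- stated objective: simpler
-- what changed: B replaces A's per-corner count dict and the overlap-correction summation pass with a single covered-corner set, using the identity 2*len(side_panels) - overlap = len(distinct covered corners), and drops the open-sides scan, which is provably redundant when at most two of the four sides carry panels.
import Mathlib
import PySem

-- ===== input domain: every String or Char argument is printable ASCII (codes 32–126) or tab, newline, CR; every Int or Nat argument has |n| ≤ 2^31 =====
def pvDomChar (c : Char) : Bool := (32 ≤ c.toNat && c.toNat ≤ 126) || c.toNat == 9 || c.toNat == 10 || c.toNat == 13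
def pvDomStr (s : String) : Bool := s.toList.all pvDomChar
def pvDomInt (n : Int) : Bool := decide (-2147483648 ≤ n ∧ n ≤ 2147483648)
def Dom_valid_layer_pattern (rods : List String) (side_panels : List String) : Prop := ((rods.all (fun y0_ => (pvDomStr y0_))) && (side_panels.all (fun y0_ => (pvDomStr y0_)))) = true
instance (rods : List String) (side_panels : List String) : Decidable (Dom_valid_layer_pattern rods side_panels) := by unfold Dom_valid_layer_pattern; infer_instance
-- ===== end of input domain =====

-- B replaces A's corner-count dict and overlap-summation pass with a single covered-corner set
-- (equivalent_total = len rods + #covered) and drops the open-sides scan, which the proof shows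
-- is redundant under the ≤2-panel guard (objective: simpler).


-- ===== PORT A =====
def pyCORNERS : List String := ["FL", "FR", "BR", "BL"]
def pySIDES : List String := ["front", "right", "back", "left"]
def pySIDE_CORNERS : PySem.Dict String (String × String) :=
  PySem.Dict.ofList [("front", ("FL","FR")), ("back", ("BL","BR")), ("left", ("FL","BL")), ("right", ("FR","BR"))]

def corners_from_side_panels (side_panels : List String) : PySem.Set String :=
  side_panels.foldl (fun covered side =>
    match pySIDE_CORNERS.get? side with
    | some (c1, c2) => PySem.Set.add (PySem.Set.add covered c1) c2
    | none => covered) PySem.Set.empty  -- none = KeyError in Python; excluded by Pre_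

def open_sides (side_panels : List String) : List String :=
  pySIDES.filter (fun side => !side_panels.contains side)

def valid_layer_pattern (rods : List String) (side_panels : List String) : Bool :=
  if PySem.List.len side_panels > 2 then false
  else
    let pcc0 : PySem.Dict String Int := pyCORNERS.foldl (fun d c => d.insert c 0) PySem.Dict.empty
    let pcc : PySem.Dict String Int := side_panels.foldl (fun d side =>
        match pySIDE_CORNERS.get? side with
        | some (c1, c2) => (d.modify c1 0 (· + 1)).modify c2 0 (· + 1)
        | none => d) pcc0  -- none = KeyError in Python; excluded by Pre_
    let overlap_correction : Int := (pcc.values.map (fun count => max 0 (count - 1))).sum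
    let equivalent_total : Int := PySem.List.len rods + 2 * PySem.List.len side_panels - overlap_correction
    if equivalent_total ≠ 4 then false
    else if ¬ (PySem.Set.equal (PySem.Set.union (PySem.Set.ofList rods) (corners_from_side_panels side_panels)) (PySem.Set.ofList pyCORNERS) = true) then false
    else if PySem.List.len (open_sides side_panels) < 1 then false
    else true

-- ===== PORT B =====
def valid_layer_pattern_alt (rods : List String) (side_panels : List String) : Bool :=
  if PySem.List.len side_panels > 2 then false
  else
    let covered : PySem.Set String := side_panels.foldl (fun cov side =>
        match pySIDE_CORNERS.get? side with
        | some (c1, c2) => PySem.Set.add (PySem.Set.add cov c1) c2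
        | none => cov) PySem.Set.empty  -- none = KeyError in Python; excluded by Pre_
    if PySem.List.len rods + PySem.Set.len covered ≠ 4 then false
    else PySem.Set.equal (PySem.Set.union (PySem.Set.ofList rods) covered) (PySem.Set.ofList pyCORNERS)

-- ===== PRECONDITION & SPEC =====
-- Pre_ excludes exactly the inputs where both Pythons raise KeyError: a side_panels list of
-- length ≤ 2 (so the SIDE_CORNERS loop is reached) containing a string that is not a side name.
def Pre_valid_layer_pattern (rods : List String) (side_panels : List String) : Prop :=
  2 < side_panels.length ∨ ∀ s ∈ side_panels, s ∈ pySIDES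
instance (rods : List String) (side_panels : List String) : Decidable (Pre_valid_layer_pattern rods side_panels) := by unfold Pre_valid_layer_pattern; infer_instance

def pvWitness_valid_layer_pattern : List String × List String := (["FL", "FR"], ["back"])

def Spec_valid_layer_pattern (rods : List String) (side_panels : List String) (out : Bool) : Prop := out = valid_layer_pattern_alt rods side_panels
instance (rods : List String) (side_panels : List String) (out : Bool) : Decidable (Spec_valid_layer_pattern rods side_panels out) := by unfold Spec_valid_layer_pattern; infer_instance

-- ===== CLAIM (what is proved, stated in full; the proofs are below) =====
def Claim_equal_valid_layer_pattern : Prop := ∀ (rods : List String) (side_panels : List String), Dom_valid_layer_pattern rods side_panels → Pre_valid_layer_pattern rods side_panels → Spec_valid_layer_pattern rods side_panels (valid_layer_pattern rods side_panels)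

-- ===== LEMMAS AND PROOFS =====

-- A's overlap-correction sum, as a named function of side_panels (definitionally the
-- value A's let-chain computes), so closed instances can be evaluated by `decide`.
def pvOverlapA (side_panels : List String) : Int :=
  (((side_panels.foldl (fun d side =>
        match pySIDE_CORNERS.get? side with
        | some (c1, c2) => (d.modify c1 0 (· + 1)).modify c2 0 (· + 1)
        | none => d) (pyCORNERS.foldl (fun d c => d.insert c 0) (PySem.Dict.empty : PySem.Dict String Int))).values).map
      (fun count => max 0 (count - 1))).sum

theorem pvA_eq (rods side_panels : List String) :
    valid_layer_pattern rods side_panels =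
      (if PySem.List.len side_panels > 2 then false
       else if PySem.List.len rods + 2 * PySem.List.len side_panels - pvOverlapA side_panels ≠ 4 then false
       else if ¬ (PySem.Set.equal (PySem.Set.union (PySem.Set.ofList rods) (corners_from_side_panels side_panels)) (PySem.Set.ofList pyCORNERS) = true) then false
       else if PySem.List.len (open_sides side_panels) < 1 then false
       else true) := rfl

theorem pvB_eq (rods side_panels : List String) :
    valid_layer_pattern_alt rods side_panels =
      (if PySem.List.len side_panels > 2 then false
       else if PySem.List.len rods + PySem.Set.len (corners_from_side_panels side_panels) ≠ 4 then false
       else PySem.Set.equal (PySem.Set.union (PySem.Set.ofList rods) (corners_from_side_panels side_panels)) (PySem.Set.ofList pyCORNERS)) := rfl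

-- The key finite facts: with at most two valid side panels, A's 2·panels − overlap equals the
-- number of distinct covered corners, and at least one side stays open.
theorem pv_core (side_panels : List String) (hlen : side_panels.length ≤ 2)
    (hmem : ∀ s ∈ side_panels, s ∈ pySIDES) :
    2 * PySem.List.len side_panels - pvOverlapA side_panels = PySem.Set.len (corners_from_side_panels side_panels)
      ∧ 1 ≤ (open_sides side_panels).length := by
  rcases side_panels with _ | ⟨a, _ | ⟨b, _ | ⟨c, t⟩⟩⟩
  · decide
  · have ha := hmem a (by simp)
    simp only [pySIDES, List.mem_cons, List.not_mem_nil, or_false] at ha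
    rcases ha with rfl | rfl | rfl | rfl <;> decide
  · have ha := hmem a (by simp)
    have hb := hmem b (by simp)
    simp only [pySIDES, List.mem_cons, List.not_mem_nil, or_false] at ha hb
    rcases ha with rfl | rfl | rfl | rfl <;> rcases hb with rfl | rfl | rfl | rfl <;> decide
  · simp at hlen

theorem pv_main (rods sp : List String) (hpre : 2 < sp.length ∨ ∀ s ∈ sp, s ∈ pySIDES) :
    valid_layer_pattern rods sp = valid_layer_pattern_alt rods sp := by
  rw [pvA_eq, pvB_eq]
  by_cases hlen : PySem.List.len sp > 2
  · rw [if_pos hlen, if_pos hlen]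
  · have hlen' : sp.length ≤ 2 := by
      rw [PySem.List.len_eq] at hlen; omega
    have hmem : ∀ s ∈ sp, s ∈ pySIDES := hpre.resolve_left (by omega)
    obtain ⟨h1, h2⟩ := pv_core sp hlen' hmem
    rw [if_neg hlen, if_neg hlen]
    have hc : PySem.List.len rods + 2 * PySem.List.len sp - pvOverlapA sp
        = PySem.List.len rods + PySem.Set.len (corners_from_side_panels sp) := by omega
    rw [hc]
    have hos : ¬ (PySem.List.len (open_sides sp) < 1) := by
      rw [PySem.List.len_eq]; omega
    by_cases h4 : PySem.List.len rods + PySem.Set.len (corners_from_side_panels sp) ≠ 4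
    · rw [if_pos h4, if_pos h4]
    · rw [if_neg h4, if_neg h4]
      cases he : PySem.Set.equal (PySem.Set.union (PySem.Set.ofList rods) (corners_from_side_panels sp)) (PySem.Set.ofList pyCORNERS) with
      | true =>
          have hne : open_sides sp ≠ [] := List.ne_nil_of_length_pos (by omega)
          simp [hne]
      | false => simp

-- ===== VERDICT (by name: the statement is the Claim_ definition above) =====
theorem valid_layer_pattern_spec : Claim_equal_valid_layer_pattern := by
  intro rods side_panels _hdom hpre
  unfold Spec_valid_layer_pattern
  exact pv_main rods side_panels hpre
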